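-- pv_equiv track=rewrite | github.com/hansyuan/brainTeaserPrograms | p51/p51.py | generateChoices
-- ===== SOURCE A (Python) =====
-- def generateChoices(digits):
--     listOfBinaryLists = []
--
--     # There are 2 ^ digits possibilities.
--     for number in range(1, int((2**digits))):
--         binNum = list(str(bin(number)))
--
--         holder = []
--         for digit in range(0, digits):
--             if binNum[-1] != 'b':
--                 holder.insert(0, binNum.pop())
--             else:
--                 holder.insert(0,'0')
--         listOfBinaryLists.append(holder)
--     return listOfBinaryLists
-- ===== SOURCE B (Python) =====
-- def generateChoices(digits):
--     # Doubling construction: the rows for d digits are the rows for d-1 digits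
--     # prefixed with '0', followed by the same rows prefixed with '1'.
--     # rows starts as the single 0-digit row []; after the loop it holds the
--     # binary expansions of 0 .. 2**digits - 1 in order; drop the all-zero row 0.
--     rows = [[]]
--     for _ in range(digits):
--         rows = [['0'] + r for r in rows] + [['1'] + r for r in rows]
--     return rows[1:]
-- ===== Notes on version B (the rewrite author's own statement) =====
-- stated objective: alternative
-- what changed: Replaces A's per-number bin()/str conversion with repeated pop/insert(0) zero-padding by a single doubling construction that builds all zero-padded rows at once ('0'-prefixed copies followed by '1'-prefixed copies, digits times) and drops the all-zero first row.
import Mathlib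
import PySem

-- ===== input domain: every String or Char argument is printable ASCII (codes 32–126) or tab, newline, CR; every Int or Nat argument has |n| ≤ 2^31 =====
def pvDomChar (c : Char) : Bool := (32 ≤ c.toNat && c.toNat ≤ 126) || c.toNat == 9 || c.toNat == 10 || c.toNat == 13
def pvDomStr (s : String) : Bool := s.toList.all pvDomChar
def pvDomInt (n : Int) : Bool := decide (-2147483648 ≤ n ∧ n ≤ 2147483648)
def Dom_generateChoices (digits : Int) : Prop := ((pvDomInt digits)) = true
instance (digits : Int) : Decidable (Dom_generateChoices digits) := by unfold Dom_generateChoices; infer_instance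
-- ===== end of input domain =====

-- B replaces A's per-number bin()/pop/insert(0) padding by one doubling construction
-- of all zero-padded rows ('0'-prefixed copies then '1'-prefixed copies, digits times,
-- dropping the all-zero first row): a different algorithm for the same list.

-- ===== PORT A =====
-- A's inner loop 'for digit in range(0, digits)': binNum[-1] is pyGet? binNum (-1),
-- binNum.pop() is pop? binNum (-1), holder.insert(0, x) is x :: holder.
-- (The 'none' arm of pop? is unreachable: binNum always keeps its '0','b' prefix.)
def pvPadLoop : Nat → List String → List String → List String
  | 0, _, holder => holder
  | d + 1, binNum, holder =>
    if PySem.List.pyGet? binNum (-1) ≠ some "b" then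
      match PySem.List.pop? binNum (-1) with
      | some (x, rest) => pvPadLoop d rest (x :: holder)
      | none => holder
    else
      pvPadLoop d binNum ("0" :: holder)

-- int(2**digits) is 0 for digits < 0 (int of a float in (0,1)), else 2^digits;
-- list(str(bin(number))) is the characters of bin(number) as one-char strings.
def generateChoices (digits : Int) : List (List String) :=
  (PySem.List.pyRange 1 (if digits < 0 then 0 else 2 ^ digits.toNat)).map
    (fun number =>
      let binNum := (PySem.Int.pyBin number).toList.map (fun c => String.ofList [c])
      pvPadLoop digits.toNat binNum [])

-- ===== PORT B =====
-- one pass of B's loop body: '0'-prefixed copies of all rows, then '1'-prefixed copies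
def pvDouble (rows : List (List String)) : List (List String) :=
  rows.map (fun r => "0" :: r) ++ rows.map (fun r => "1" :: r)

-- B's loop 'for _ in range(digits)' as structural recursion on the trip count
def pvRows : Nat → List (List String)
  | 0 => [[]]
  | d + 1 => pvDouble (pvRows d)

def generateChoices_alt (digits : Int) : List (List String) :=
  (pvRows digits.toNat).drop 1   -- rows[1:]

-- ===== PRECONDITION & SPEC =====
def Spec_generateChoices (digits : Int) (out : List (List String)) : Prop := out = generateChoices_alt digits
instance (digits : Int) (out : List (List String)) : Decidable (Spec_generateChoices digits out) := by unfold Spec_generateChoices; infer_instance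

-- ===== CLAIM (what is proved, stated in full; the proofs are below) =====
def Claim_equal_generateChoices : Prop := ∀ (digits : Int), Dom_generateChoices digits → Spec_generateChoices digits (generateChoices digits)

-- ===== LEMMAS AND PROOFS =====

-- the binary digits of n, most significant first (empty for n = 0)
def pvBinChars (n : Nat) : List Char :=
  if h : n = 0 then [] else pvBinChars (n / 2) ++ [if n % 2 = 1 then '1' else '0']
decreasing_by exact Nat.div_lt_self (Nat.pos_of_ne_zero h) (by norm_num)

def pvBinS (n : Nat) : List String := (pvBinChars n).map (fun c => String.ofList [c])

-- the closed form of one output row: zero-padding then the binary digits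
def pvPadRow (d n : Nat) : List String :=
  List.replicate (d - (pvBinChars n).length) "0" ++ pvBinS n

theorem pvS0 : String.ofList ['0'] = "0" := by decide
theorem pvS1 : String.ofList ['1'] = "1" := by decide
theorem pvSb : String.ofList ['b'] = "b" := by decide

theorem pvBinChars_zero : pvBinChars 0 = [] := by rw [pvBinChars]; simp

theorem pvBinChars_one : pvBinChars 1 = ['1'] := by
  rw [pvBinChars, dif_neg one_ne_zero]
  norm_num [pvBinChars_zero]

theorem pvTdcEq : ∀ (f n : Nat) (l : List Char), 0 < n → n < f →
    Nat.toDigitsCore 2 f n l = pvBinChars n ++ l := by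
  intro f
  induction f with
  | zero => intro n l _ h2; omega
  | succ f ih =>
    intro n l h1 h2
    have hstep : Nat.toDigitsCore 2 (f + 1) n l =
        if n / 2 = 0 then (n % 2).digitChar :: l
        else Nat.toDigitsCore 2 f (n / 2) ((n % 2).digitChar :: l) := rfl
    rw [hstep]
    by_cases hz : n / 2 = 0
    · have hn1 : n = 1 := by omega
      subst hn1
      rw [if_pos hz, pvBinChars_one]
      rfl
    · rw [if_neg hz, ih (n / 2) _ (Nat.pos_of_ne_zero hz) (by omega)]
      conv_rhs => rw [pvBinChars, dif_neg (by omega : ¬ n = 0)]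
      have hdc : (n % 2).digitChar = if n % 2 = 1 then '1' else '0' := by
        rcases Nat.mod_two_eq_zero_or_one n with h | h <;> rw [h] <;> rfl
      rw [hdc]
      simp

theorem pvBinNumEq (n : Nat) (h : 0 < n) :
    ((PySem.Int.pyBin (n : Int)).toList.map (fun c => String.ofList [c])) = "0" :: "b" :: pvBinS n := by
  rw [PySem.Int.toList_pyBin, PySem.Int.toBinChars0b]
  rw [if_neg (by omega : ¬ ((n : Int) < 0))]
  rw [show ((n : Int)).toNat = n from Int.toNat_natCast n]
  rw [Nat.toDigits, pvTdcEq (n + 1) n [] h (by omega)]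
  simp only [List.append_nil, List.map_cons, pvS0, pvSb, pvBinS]

theorem pvPadLoopBase : ∀ (d : Nat) (h : List String),
    pvPadLoop d ["0", "b"] h = List.replicate d "0" ++ h := by
  intro d
  induction d with
  | zero => intro h; simp [pvPadLoop]
  | succ d ih =>
    intro h
    rw [pvPadLoop]
    rw [if_neg (by decide)]
    rw [ih]
    rw [List.replicate_succ' (n := d)]
    simp

theorem pvPadLoopPop (suffix : List String) : ∀ (d : Nat) (h : List String),
    "b" ∉ suffix → suffix.length ≤ d →
    pvPadLoop d (["0", "b"] ++ suffix) h =
      List.replicate (d - suffix.length) "0" ++ suffix ++ h := by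
  induction suffix using List.reverseRecOn with
  | nil => intro d h _ _; simpa using pvPadLoopBase d h
  | append_singleton s x ih =>
    intro d h hb hlen
    have hlen' : s.length + 1 ≤ d := by simpa using hlen
    obtain ⟨d', rfl⟩ : ∃ d', d = d' + 1 := ⟨d - 1, by omega⟩
    have hx : x ≠ "b" := fun hxx => hb (by simp [hxx])
    have hget : PySem.List.pyGet? ("0" :: "b" :: (s ++ [x])) (-1) = some x := by
      simpa using PySem.List.pyGet?_neg_one_append_singleton ("0" :: "b" :: s) x
    have hpop : PySem.List.pop? ("0" :: "b" :: (s ++ [x])) (-1) = some (x, "0" :: "b" :: s) := by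
      simpa using PySem.List.pop?_last ("0" :: "b" :: s) x
    show pvPadLoop (d' + 1) ("0" :: "b" :: (s ++ [x])) h = _
    rw [pvPadLoop]
    rw [if_pos (by rw [hget]; simp [hx])]
    rw [hpop]
    show pvPadLoop d' ("0" :: "b" :: s) (x :: h) = _
    have hih := ih d' (x :: h) (fun hm => hb (by simp [hm])) (by omega)
    simp only [List.cons_append, List.nil_append] at hih
    rw [hih]
    simp only [List.length_append, List.length_singleton]
    rw [show d' + 1 - (s.length + 1) = d' - s.length by omega]
    simp

theorem pvBinCharsLen : ∀ (d n : Nat), n < 2 ^ d → (pvBinChars n).length ≤ d := by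
  intro d
  induction d with
  | zero =>
    intro n h
    have hn : n = 0 := by omega
    subst hn; rw [pvBinChars_zero]; simp
  | succ d ih =>
    intro n h
    by_cases hz : n = 0
    · subst hz; rw [pvBinChars_zero]; simp
    · rw [pvBinChars, dif_neg hz]
      have hlt : n / 2 < 2 ^ d := by
        have := Nat.pow_succ 2 d ▸ h
        omega
      have := ih (n / 2) hlt
      simp [List.length_append]
      omega

theorem pvBinCharsMem : ∀ (n : Nat), ∀ c ∈ pvBinChars n, c = '0' ∨ c = '1' := by
  intro n
  induction n using Nat.strong_induction_on with
  | _ n ih =>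
    intro c hc
    by_cases hz : n = 0
    · subst hz; rw [pvBinChars_zero] at hc; simp at hc
    · rw [pvBinChars, dif_neg hz] at hc
      rcases List.mem_append.mp hc with h | h
      · exact ih (n / 2) (Nat.div_lt_self (Nat.pos_of_ne_zero hz) (by norm_num)) c h
      · simp at h
        split at h <;> simp [h]

theorem pvBNotMem (n : Nat) : "b" ∉ pvBinS n := by
  intro hm
  simp only [pvBinS, List.mem_map] at hm
  obtain ⟨c, hc, he⟩ := hm
  rcases pvBinCharsMem n c hc with rfl | rfl <;> exact absurd he (by decide)

theorem pvBinCharsShift : ∀ (d n : Nat), n < 2 ^ d →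
    pvBinChars (n + 2 ^ d) =
      '1' :: (List.replicate (d - (pvBinChars n).length) '0' ++ pvBinChars n) := by
  intro d
  induction d with
  | zero =>
    intro n h
    have hn : n = 0 := by omega
    subst hn
    norm_num [pvBinChars_one, pvBinChars_zero]
  | succ d ih =>
    intro n h
    have hne : n + 2 ^ (d + 1) ≠ 0 := by positivity
    rw [pvBinChars, dif_neg hne]
    have hpow : (2 : Nat) ^ (d + 1) = 2 * 2 ^ d := by ring
    have hdiv : (n + 2 ^ (d + 1)) / 2 = n / 2 + 2 ^ d := by
      rw [hpow, Nat.add_mul_div_left n (2 ^ d) (by norm_num)]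
    have hmod : (n + 2 ^ (d + 1)) % 2 = n % 2 := by
      rw [hpow]; omega
    have hlt : n / 2 < 2 ^ d := by rw [hpow] at h; omega
    rw [hdiv, ih (n / 2) hlt, hmod]
    by_cases hz : n = 0
    · subst hz
      rw [pvBinChars_zero]
      simp [← List.replicate_succ' (n := d)]
    · rw [show pvBinChars n = pvBinChars (n / 2) ++ [if n % 2 = 1 then '1' else '0'] from by
        rw [pvBinChars, dif_neg hz]]
      simp only [List.length_append, List.length_singleton]
      rw [show d + 1 - ((pvBinChars (n / 2)).length + 1) = d - (pvBinChars (n / 2)).length by omega]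
      simp

theorem pvRowEq (d n : Nat) (_h1 : 0 < n) (h2 : n < 2 ^ d) :
    pvPadLoop d ("0" :: "b" :: pvBinS n) [] = pvPadRow d n := by
  have hlen : (pvBinS n).length ≤ d := by
    simpa [pvBinS] using pvBinCharsLen d n h2
  have hpp := pvPadLoopPop (pvBinS n) d [] (pvBNotMem n) hlen
  simp only [List.cons_append, List.nil_append] at hpp ⊢
  rw [hpp]
  simp [pvPadRow, pvBinS]

theorem pvMain : ∀ (d : Nat), (List.range (2 ^ d)).map (pvPadRow d) = pvRows d := by
  intro d
  induction d with
  | zero =>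
    simp [pvPadRow, pvBinS, pvBinChars_zero, pvRows]
  | succ d ih =>
    have hsplit : (2 : Nat) ^ (d + 1) = 2 ^ d + 2 ^ d := by ring
    rw [hsplit, List.range_add, List.map_append]
    have h0 : (List.range (2 ^ d)).map (pvPadRow (d + 1)) =
        ((List.range (2 ^ d)).map (pvPadRow d)).map (fun r => "0" :: r) := by
      rw [List.map_map]
      apply List.map_congr_left
      intro n hn
      have hn' : n < 2 ^ d := List.mem_range.mp hn
      have hlen := pvBinCharsLen d n hn'
      simp only [Function.comp_apply, pvPadRow]
      rw [show d + 1 - (pvBinChars n).length = (d - (pvBinChars n).length) + 1 by omega]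
      simp [List.replicate_succ]
    have h1 : ((List.range (2 ^ d)).map (fun x => 2 ^ d + x)).map (pvPadRow (d + 1)) =
        ((List.range (2 ^ d)).map (pvPadRow d)).map (fun r => "1" :: r) := by
      rw [List.map_map, List.map_map]
      apply List.map_congr_left
      intro n hn
      have hn' : n < 2 ^ d := List.mem_range.mp hn
      have hlen := pvBinCharsLen d n hn'
      have hshift := pvBinCharsShift d n hn'
      simp only [Function.comp_apply, pvPadRow]
      rw [show 2 ^ d + n = n + 2 ^ d by omega, hshift]
      have hlenS : ('1' :: (List.replicate (d - (pvBinChars n).length) '0' ++ pvBinChars n)).length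
          = d + 1 := by simp; omega
      rw [hlenS, Nat.sub_self]
      simp only [List.replicate_zero, List.nil_append, pvBinS, hshift, List.map_cons,
        List.map_append, List.map_replicate, pvS0, pvS1]
    rw [h0, h1, ih]
    rfl

theorem pvAltAsMap (d : Nat) :
    (pvRows d).drop 1 = (List.range (2 ^ d - 1)).map (fun k => pvPadRow d (k + 1)) := by
  rw [← pvMain d]
  have hp : (2 : Nat) ^ d = (2 ^ d - 1) + 1 := by
    have : 0 < 2 ^ d := by positivity
    omega
  rw [hp, List.range_succ_eq_map]
  simp only [List.map_cons, List.drop_succ_cons, List.drop_zero, List.map_map]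
  apply List.map_congr_left
  intro k _
  simp [Function.comp, Nat.succ_eq_add_one]

-- ===== VERDICT (by name: the statement is the Claim_ definition above) =====
theorem generateChoices_spec : Claim_equal_generateChoices := by
  intro digits _
  unfold Spec_generateChoices generateChoices generateChoices_alt
  by_cases hneg : digits < 0
  · rw [if_pos hneg]
    rw [show digits.toNat = 0 from Int.toNat_of_nonpos (by omega)]
    simp [pvRows]
  · rw [if_neg hneg]
    set d := digits.toNat with hd
    rw [PySem.List.pyRange_one]
    rw [pvAltAsMap d]
    have hbt : (((2 : Int) ^ d) - 1).toNat = 2 ^ d - 1 := by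
      have : ((2 : Int) ^ d) = ((2 ^ d : Nat) : Int) := by push_cast; ring
      rw [this]; omega
    rw [hbt, List.map_map]
    apply List.map_congr_left
    intro k hk
    have hk' : k < 2 ^ d - 1 := List.mem_range.mp hk
    simp only [Function.comp_apply]
    have hcast : (1 : Int) + (k : Int) = ((k + 1 : Nat) : Int) := by push_cast; ring
    rw [hcast, pvBinNumEq (k + 1) (by omega)]
    exact pvRowEq d (k + 1) (by omega) (by omega)
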